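-- pv_equiv track=rewrite | github.com/0817-Python-Algorithm/1Day1Algorithm | 98/ProgrammersAlgorithm/ArrayHashSearch_19.py | solution
-- ===== SOURCE A (Python) =====
-- def hashing(list):
--     p = 31
--     m = 1_000_000_007
--
--     hashed_list = []
--
--     for s in list:
--         hash_result = 0
--         length = len(s)
--         for i in range(length):
--             # 여기서 ord 함수가 중요함. ord 함수는 인자로 들어온 char타입의 값을 유니코드로 변환해 줌.
--             hash_result += (ord(s[i]) * p**i)%m
--         hash_result %= m
--         hashed_list.append(hash_result)
--     return hashed_list
--
-- def solution(string_list, query_list):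
--     answer = []
--     hashed_string_list = hashing(string_list)
--     hashed_query_list = hashing(query_list)
--     for query in hashed_query_list:
--         # 해당 값이 배열에 포함되어 있는지를 확인하려면 in을 적극적으로 쓰자.
--         # in 연산자를 좀 더 깊이 알아보자.
--         # in은 리스트, 튜플에서는 하나씩 다 돌면서 확인해야 하기 때문에 O(N)의 시간복잡도를 갖는다.
--         # 반면, Set, Dictionary에서는 내부적인 hash를 통해서 접근하기 때문에 시간복잡도가 O(1)이 가능하다.
--         # 만약 충돌이 많이 발생할 경우엔 O(N)까지 떨어질 수도 있다.
--         if query in hashed_string_list: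
--             answer.append(True)
--         else:
--             answer.append(False)
--     return answer
-- ===== SOURCE B (Python) =====
-- def solution(string_list, query_list):
--     p = 31
--     m = 1_000_000_007
--
--     def h(s):
--         acc = 0
--         for c in reversed(s):
--             acc = (acc * p + ord(c)) % m
--         return acc
--
--     hashed = {h(s) for s in string_list}
--     return [h(q) in hashed for q in query_list]
-- ===== Notes on version B (the rewrite author's own statement) =====
-- stated objective: faster
-- what changed: The per-character hash is computed by a reversed Horner recurrence h = (h*p + ord(c)) % m instead of summing ord(s[i])*p**i with a fresh big-int power per index, and query membership is tested against a set of string hashes built once instead of scanning the hash list per query.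
import Mathlib
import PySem

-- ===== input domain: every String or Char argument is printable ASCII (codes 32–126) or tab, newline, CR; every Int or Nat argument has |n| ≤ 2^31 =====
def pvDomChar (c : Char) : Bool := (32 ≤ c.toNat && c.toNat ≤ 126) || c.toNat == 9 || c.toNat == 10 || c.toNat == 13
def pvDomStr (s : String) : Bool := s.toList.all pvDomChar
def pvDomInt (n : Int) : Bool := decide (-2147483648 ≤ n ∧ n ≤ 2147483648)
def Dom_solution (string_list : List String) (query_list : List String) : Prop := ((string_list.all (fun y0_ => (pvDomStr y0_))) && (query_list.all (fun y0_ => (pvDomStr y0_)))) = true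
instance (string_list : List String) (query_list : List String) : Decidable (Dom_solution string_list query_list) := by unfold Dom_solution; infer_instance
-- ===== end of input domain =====

-- B replaces A's per-index power sum (ord(s[i])*p**i summed with a big-int power each step)
-- by a reversed Horner recurrence modulo m and a set for the membership test (measured faster: no unbounded-power big-int arithmetic, no per-query list scan).

-- ===== PORT A =====
-- hashing: for each string, sum (ord(s[i]) * p**i) % m over i in range(len(s)), then % m
def pvHashA (s : String) : Int :=
  let cs := s.toList
  PySem.Int.mod
    ((PySem.List.pyRange 0 (cs.length : Int) 1).foldl
      (fun hr i =>
        hr + PySem.Int.mod (((PySem.List.pyGetD cs i ' ').toNat : Int) * 31 ^ i.toNat) 1000000007)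
      0)
    1000000007

def pvHashingA (l : List String) : List Int :=
  l.foldl (fun acc s => acc ++ [pvHashA s]) []

def solution (string_list : List String) (query_list : List String) : List Bool :=
  let hashed_string_list := pvHashingA string_list
  let hashed_query_list := pvHashingA query_list
  hashed_query_list.foldl
    (fun answer query => answer ++ [if hashed_string_list.contains query then true else false]) []

-- ===== PORT B =====
-- h: reversed Horner recurrence  acc = (acc*p + ord(c)) % m  over the characters from the end
def pvHashB (s : String) : Int :=
  s.toList.reverse.foldl (fun acc c => PySem.Int.mod (acc * 31 + (c.toNat : Int)) 1000000007) 0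

def solution_alt (string_list : List String) (query_list : List String) : List Bool :=
  let hashed : PySem.Set Int := PySem.Set.ofList (string_list.map pvHashB)
  query_list.map (fun q => PySem.Set.contains hashed (pvHashB q))

-- ===== PRECONDITION & SPEC =====
def Spec_solution (string_list : List String) (query_list : List String) (out : List Bool) : Prop := out = solution_alt string_list query_list
instance (string_list : List String) (query_list : List String) (out : List Bool) : Decidable (Spec_solution string_list query_list out) := by unfold Spec_solution; infer_instance

-- ===== CLAIM (what is proved, stated in full; the proofs are below) =====
def Claim_equal_solution : Prop := ∀ (string_list : List String) (query_list : List String), Dom_solution string_list query_list → Spec_solution string_list query_list (solution string_list query_list)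

-- ===== LEMMAS AND PROOFS =====

-- the common polynomial  Σ ord(cs[i]) * 31^i
def pvPoly : List Char → Int
  | [] => 0
  | c :: cs => (c.toNat : Int) + 31 * pvPoly cs

-- the plain (un-modded) Horner fold respects congruence mod m in its accumulator
theorem pvHnm_modeq (l : List Char) {x y : Int}
    (h : x ≡ y [ZMOD 1000000007]) :
    l.foldl (fun a c => a * 31 + (c.toNat : Int)) x
      ≡ l.foldl (fun a c => a * 31 + (c.toNat : Int)) y [ZMOD 1000000007] := by
  induction l generalizing x y with
  | nil => exact h
  | cons c l ih => exact ih ((h.mul_right 31).add_right _)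

-- B's per-step-modded Horner fold equals the plain fold taken mod m
theorem pvHornerFold_eq (l : List Char) (h : Int) (h0 : 0 ≤ h) (hM : h < 1000000007) :
    l.foldl (fun a c => (a * 31 + (c.toNat : Int)) % 1000000007) h
      = (l.foldl (fun a c => a * 31 + (c.toNat : Int)) h) % 1000000007 := by
  induction l generalizing h with
  | nil => exact (Int.emod_eq_of_lt h0 hM).symm
  | cons c l ih =>
    simp only [List.foldl_cons]
    rw [ih _ (Int.emod_nonneg _ (by norm_num)) (Int.emod_lt_of_pos _ (by norm_num))]
    exact pvHnm_modeq l
      (Int.emod_emod_of_dvd _ dvd_rfl :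
        (h * 31 + (c.toNat : Int)) % 1000000007 ≡ h * 31 + (c.toNat : Int) [ZMOD 1000000007])

-- Horner over the reversed characters computes the polynomial
theorem pvHnm_reverse (cs : List Char) :
    cs.reverse.foldl (fun a c => a * 31 + (c.toNat : Int)) 0 = pvPoly cs := by
  induction cs with
  | nil => rfl
  | cons c cs ih =>
    simp only [List.reverse_cons, List.foldl_append, ih, List.foldl_cons, List.foldl_nil, pvPoly]
    ring

theorem pvHashB_eq_poly (s : String) : pvHashB s = pvPoly s.toList % 1000000007 := by
  unfold pvHashB
  simp only [PySem.Int.mod_eq_emod_of_pos (by norm_num : (0:Int) < 1000000007)]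
  rw [pvHornerFold_eq _ 0 le_rfl (by norm_num), pvHnm_reverse]

-- A's power sum is the same polynomial
theorem pvSum_poly (cs : List Char) :
    ((List.range cs.length).map (fun k => ((cs.getD k ' ').toNat : Int) * 31 ^ k)).sum
      = pvPoly cs := by
  induction cs with
  | nil => rfl
  | cons c cs ih =>
    rw [List.length_cons, List.range_succ_eq_map, List.map_cons, List.map_map]
    have : ((List.range cs.length).map
        ((fun k => (((c :: cs).getD k ' ').toNat : Int) * 31 ^ k) ∘ Nat.succ)).sum
        = ((List.range cs.length).map (fun k => 31 * (((cs.getD k ' ').toNat : Int) * 31 ^ k))).sum := by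
      congr 1
      apply List.map_congr_left
      intro k _
      simp only [Function.comp, List.getD_cons_succ, pow_succ]
      ring
    simp only [List.sum_cons, this, List.sum_map_mul_left, ih, pvPoly, List.getD_cons_zero,
      pow_zero, mul_one]

-- summing the per-term mods is, mod m, summing the terms
theorem pvSum_mod {β : Type} (l : List β) (t : β → Int) :
    (l.map (fun x => t x % 1000000007)).sum ≡ (l.map t).sum [ZMOD 1000000007] := by
  induction l with
  | nil => rfl
  | cons a l ih =>
    simp only [List.map_cons, List.sum_cons]
    exact Int.ModEq.add
      (Int.emod_emod_of_dvd _ dvd_rfl : t a % 1000000007 ≡ t a [ZMOD 1000000007]) ih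

theorem pvHashA_eq_poly (s : String) : pvHashA s = pvPoly s.toList % 1000000007 := by
  unfold pvHashA
  simp only [PySem.Int.mod_eq_emod_of_pos (by norm_num : (0:Int) < 1000000007)]
  rw [PySem.List.pyRange_one, List.foldl_map, PySem.List.foldl_add, zero_add]
  simp only [zero_add, Int.sub_zero, Int.toNat_natCast, PySem.List.pyGetD_natCast]
  have h := pvSum_mod (List.range s.toList.length)
    (fun k => ((s.toList.getD k ' ').toNat : Int) * 31 ^ k)
  rw [pvSum_poly] at h
  exact h

theorem pvHash_eq (s : String) : pvHashA s = pvHashB s := by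
  rw [pvHashA_eq_poly, pvHashB_eq_poly]

theorem pvHashingA_eq (l : List String) : pvHashingA l = l.map pvHashB := by
  unfold pvHashingA
  rw [PySem.List.foldl_append_singleton_eq_map]
  simp [List.map_congr_left (fun s _ => pvHash_eq s)]

-- ===== VERDICT (by name: the statement is the Claim_ definition above) =====
theorem solution_spec : Claim_equal_solution := by
  intro string_list query_list _
  show solution string_list query_list = solution_alt string_list query_list
  unfold solution solution_alt
  rw [PySem.List.foldl_append_singleton_eq_map, List.nil_append, pvHashingA_eq, pvHashingA_eq,
    List.map_map]
  apply List.map_congr_left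
  intro q _
  simp [Function.comp, PySem.Set.contains, PySem.Set.mem_ofList]
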